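-- pv_equiv track=rewrite | github.com/GundalaNikhil/DSA | practice-dsa-problems/Arrays/solutions/ARR-033-subarray-xor-rank.py | count_pairs_le
-- ===== SOURCE A (Python) =====
-- class Trie:
--     def __init__(self):
--         # [left_child, right_child] indices
--         self.nodes = [[0, 0]]
--         self.count = [0]
--
--     def insert(self, x):
--         u = 0
--         self.count[u] += 1 # Root count
--         for i in range(30, -1, -1):
--             bit = (x >> i) & 1
--             if not self.nodes[u][bit]:
--                 self.nodes[u][bit] = len(self.nodes)
--                 self.nodes.append([0, 0])
--                 self.count.append(0)
--             u = self.nodes[u][bit]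
--             self.count[u] += 1
--
--     def count_less_equal(self, val, limit):
--         # Count elements y in Trie such that (val ^ y) <= limit
--         cnt = 0
--         u = 0
--         for i in range(30, -1, -1):
--             v_bit = (val >> i) & 1
--             l_bit = (limit >> i) & 1
--
--             desired_bit_for_less = v_bit # yields result 0
--             desired_bit_for_equal = 1 - v_bit # yields result 1
--
--             if l_bit == 1:
--                 child_less = self.nodes[u][desired_bit_for_less]
--                 if child_less:
--                     cnt += self.count[child_less]
--
--                 u = self.nodes[u][desired_bit_for_equal]
--             else:
--                 u = self.nodes[u][desired_bit_for_less]
--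
--             if u == 0:
--                 break
--
--         if u != 0:
--             cnt += self.count[u]
--
--         return cnt
--
-- def count_pairs_le(mid, pref, n):
--     # Count pairs (i, j) i < j such that pref[i] ^ pref[j] <= mid.
--     total = 0
--     trie = Trie()
--     trie.insert(pref[0]) # usually 0
--
--     for i in range(1, n + 1):
--         # For current pref[i], count previous pref[j] such that XOR <= mid
--         cnt = trie.count_less_equal(pref[i], mid)
--         total += cnt
--         trie.insert(pref[i])
--
--     return total
-- ===== SOURCE B (Python) =====
-- def count_pairs_le(mid, pref, n):
--     # Count pairs (i, j), i < j <= n, with (pref[i] ^ pref[j]) <= mid on the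
--     # 31 low bits (the trie in A only ever looks at bits 30..0).
--     mask = (1 << 31) - 1
--     m = mid & mask
--     total = 0
--     for j in range(1, n + 1):
--         pj = pref[j] & mask
--         for i in range(j):
--             if ((pref[i] & mask) ^ pj) <= m:
--                 total += 1
--     return total
-- ===== Notes on version B (the rewrite author's own statement) =====
-- stated objective: simpler
-- what changed: Replaces the bit-trie (insert/count_less_equal over node/count arrays) with a direct pairwise scan that masks prefix values and mid to the 31 bits the trie actually inspects and counts i<j with (pref[i]^pref[j])&mask <= mid&mask.
import Mathlib
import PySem

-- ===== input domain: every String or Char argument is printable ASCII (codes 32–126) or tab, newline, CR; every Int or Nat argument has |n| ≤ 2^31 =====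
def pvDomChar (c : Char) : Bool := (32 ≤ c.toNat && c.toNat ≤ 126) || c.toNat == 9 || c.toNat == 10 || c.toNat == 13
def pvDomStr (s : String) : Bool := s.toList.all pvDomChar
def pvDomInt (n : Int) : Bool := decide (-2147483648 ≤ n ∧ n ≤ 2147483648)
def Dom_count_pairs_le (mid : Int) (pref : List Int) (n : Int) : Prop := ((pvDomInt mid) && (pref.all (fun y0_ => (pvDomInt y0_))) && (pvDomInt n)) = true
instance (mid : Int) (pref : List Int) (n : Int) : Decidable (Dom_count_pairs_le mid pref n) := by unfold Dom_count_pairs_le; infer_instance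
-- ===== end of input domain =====

-- B replaces A's bit-trie by a direct masked pairwise count (simpler, not faster).

-- ===== PORT A =====
-- Trie state: parallel arrays `nodes` ([left,right] child indices) and `count`.
structure TrieSt where
  nodes : List (Nat × Nat)
  count : List Int

-- self.nodes[u][bit]
def trieChild (s : TrieSt) (u : Nat) (bit : Int) : Nat :=
  let p := s.nodes.getD u (0, 0)
  if bit = 1 then p.2 else p.1

-- nodes[u][bit] = v (on the pair)
def trieSetChild (p : Nat × Nat) (bit : Int) (v : Nat) : Nat × Nat :=
  if bit = 1 then (p.1, v) else (v, p.2)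

-- self.count[u] += 1
def trieIncCount (s : TrieSt) (u : Nat) : TrieSt :=
  { s with count := s.count.set u (s.count.getD u 0 + 1) }

-- `for i in range(30, -1, -1)` of Trie.insert; fuel counts remaining iterations, i = fuel-1
def trieInsertLoop (s : TrieSt) (u : Nat) (x : Int) : Nat → TrieSt
  | 0 => s
  | fuel+1 =>
    let i := fuel
    let bit := PySem.Int.band (x >>> i) 1          -- (x >> i) & 1
    let s1 := if trieChild s u bit = 0 then
        { nodes := (s.nodes.set u (trieSetChild (s.nodes.getD u (0,0)) bit s.nodes.length)) ++ [(0,0)],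
          count := s.count ++ [0] }
      else s
    let u' := trieChild s1 u bit
    trieInsertLoop (trieIncCount s1 u') u' x fuel

def trieInsert (s : TrieSt) (x : Int) : TrieSt :=
  trieInsertLoop (trieIncCount s 0) 0 x 31

-- `for i in range(30, -1, -1)` of count_less_equal, with Python's `break` as an
-- early return (after a break u == 0, so the final `if u != 0` adds nothing).
def trieQueryLoop (s : TrieSt) (u : Nat) (val limit : Int) (cnt : Int) : Nat → Int
  | 0 => if u ≠ 0 then cnt + s.count.getD u 0 else cnt
  | fuel+1 =>
    let i := fuel
    let vbit := PySem.Int.band (val >>> i) 1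
    let lbit := PySem.Int.band (limit >>> i) 1
    if lbit = 1 then
      let childLess := trieChild s u vbit
      let cnt' := if childLess ≠ 0 then cnt + s.count.getD childLess 0 else cnt
      let u' := trieChild s u (1 - vbit)
      if u' = 0 then cnt' else trieQueryLoop s u' val limit cnt' fuel
    else
      let u' := trieChild s u vbit
      if u' = 0 then cnt else trieQueryLoop s u' val limit cnt fuel

-- body of `for i in range(1, n + 1)`: count matching earlier prefixes, then insert pref[i]
def aBody (mid : Int) (pref : List Int) (acc : Int × TrieSt) (i : Int) : Int × TrieSt :=
  let x := PySem.List.pyGetD pref i 0                               -- pref[i]; in range by Pre_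
  (acc.1 + trieQueryLoop acc.2 0 x mid 0 31, trieInsert acc.2 x)

def count_pairs_le (mid : Int) (pref : List Int) (n : Int) : Int :=
  let s1 := trieInsert ⟨[(0,0)], [0]⟩ (PySem.List.pyGetD pref 0 0)  -- pref[0]; IndexError on [] excluded by Pre_
  ((PySem.List.pyRange 1 (n+1)).foldl (aBody mid pref) (0, s1)).1

-- ===== PORT B =====
-- body of `for i in range(j)`
def bInner (pref : List Int) (mask m pj : Int) (t : Int) (i : Int) : Int :=
  if PySem.Int.bxor (PySem.Int.band (PySem.List.pyGetD pref i 0) mask) pj ≤ m then t + 1 else t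

-- body of `for j in range(1, n + 1)`
def bOuter (pref : List Int) (mask m : Int) (total : Int) (j : Int) : Int :=
  let pj := PySem.Int.band (PySem.List.pyGetD pref j 0) mask        -- pref[j]; in range by Pre_
  (PySem.List.pyRange 0 j).foldl (bInner pref mask m pj) total

def count_pairs_le_alt (mid : Int) (pref : List Int) (n : Int) : Int :=
  let mask : Int := (1 <<< 31) - 1
  let m := PySem.Int.band mid mask
  (PySem.List.pyRange 1 (n+1)).foldl (bOuter pref mask m) 0

-- ===== PRECONDITION & SPEC =====
-- Pre_ excludes exactly the inputs where Python A raises IndexError: pref == []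
-- (trie.insert(pref[0])) or n >= len(pref) (pref[i] in the loop).
def Pre_count_pairs_le (mid : Int) (pref : List Int) (n : Int) : Prop :=
  pref ≠ [] ∧ n < (pref.length : Int)
instance (mid : Int) (pref : List Int) (n : Int) : Decidable (Pre_count_pairs_le mid pref n) := by unfold Pre_count_pairs_le; infer_instance

def pvWitness_count_pairs_le : Int × List Int × Int := (5, [1, 2, 3], 2)

def Spec_count_pairs_le (mid : Int) (pref : List Int) (n : Int) (out : Int) : Prop := out = count_pairs_le_alt mid pref n
instance (mid : Int) (pref : List Int) (n : Int) (out : Int) : Decidable (Spec_count_pairs_le mid pref n out) := by unfold Spec_count_pairs_le; infer_instance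

-- ===== CLAIM (what is proved, stated in full; the proofs are below) =====
def Claim_equal_count_pairs_le : Prop := ∀ (mid : Int) (pref : List Int) (n : Int), Dom_count_pairs_le mid pref n → Pre_count_pairs_le mid pref n → Spec_count_pairs_le mid pref n (count_pairs_le mid pref n)

-- ===== LEMMAS AND PROOFS =====

-- `x & ((1<<31)-1)` in ℕ form: the value the trie actually stores for x.
def msk (x : Int) : Nat := (x % 2147483648).toNat

-- number of stored values whose depth-k path (= high bits, value y / 2^(31-k)) is h
def cntk (ys : List Nat) (k h : Nat) : Nat := ys.countP (fun y => decide (y / 2^(31-k) = h))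

-- Representation invariant for a trie mid-insert: φ maps paths (depth k, high-bits
-- value h) to node indices; counts of paths of depth ≤ j along y's path are already
-- incremented (j = 0: only the root, as after `self.count[0] += 1`).
structure InvM (φ : Nat → Nat → Option Nat) (s : TrieSt) (ys : List Nat) (y : Nat) (j : Nat) : Prop where
  root : φ 0 0 = some 0
  kbound : ∀ k h, (φ k h).isSome → k ≤ 31 ∧ h < 2^k
  dom : ∀ k h, 0 < k → k ≤ 31 → h < 2^k → ((φ k h).isSome ↔ (0 < cntk ys k h ∨ (k ≤ j ∧ h = y / 2^(31-k))))
  ibound : ∀ k h i, φ k h = some i → i < s.nodes.length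
  clen : s.count.length = s.nodes.length
  inj : ∀ k h k' h' i, φ k h = some i → φ k' h' = some i → k = k' ∧ h = h'
  cnt : ∀ k h i, φ k h = some i → s.count.getD i 0 = (cntk ys k h : Int) + (if k ≤ j ∧ h = y / 2^(31-k) then 1 else 0)
  child : ∀ k h i (b : Nat), φ k h = some i → b < 2 → trieChild s i (b : Int) = (φ (k+1) (2*h + b)).getD 0

-- Representation invariant with no insert in progress.
structure InvP (φ : Nat → Nat → Option Nat) (s : TrieSt) (ys : List Nat) : Prop where
  root : φ 0 0 = some 0
  kbound : ∀ k h, (φ k h).isSome → k ≤ 31 ∧ h < 2^k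
  dom : ∀ k h, 0 < k → k ≤ 31 → h < 2^k → ((φ k h).isSome ↔ 0 < cntk ys k h)
  ibound : ∀ k h i, φ k h = some i → i < s.nodes.length
  clen : s.count.length = s.nodes.length
  inj : ∀ k h k' h' i, φ k h = some i → φ k' h' = some i → k = k' ∧ h = h'
  cnt : ∀ k h i, φ k h = some i → s.count.getD i 0 = (cntk ys k h : Int)
  child : ∀ k h i (b : Nat), φ k h = some i → b < 2 → trieChild s i (b : Int) = (φ (k+1) (2*h + b)).getD 0
  ybound : ∀ y ∈ ys, y < 2^31

-- bit i of the masked value, as ℕ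
def bitN (y i : Nat) : Nat := y / 2^i % 2

theorem msk_lt (x : Int) : msk x < 2^31 := by
  unfold msk; omega

theorem band_mask (x : Int) : PySem.Int.band x 2147483647 = (msk x : Int) := by
  unfold PySem.Int.band msk
  have ht : Int.toNat 2147483647 = 2^31 - 1 := by rfl
  by_cases hx : 0 ≤ x
  · rw [if_pos hx, if_pos (by norm_num), ht]
    rw [Nat.and_two_pow_sub_one_eq_mod x.toNat 31]
    omega
  · rw [if_neg hx, if_pos (by norm_num), ht]
    rw [Nat.and_comm, Nat.and_two_pow_sub_one_eq_mod]
    omega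

theorem band_shift_bit (x : Int) (i : Nat) (hi : i < 31) :
    PySem.Int.band (x >>> i) 1 = (bitN (msk x) i : Int) := by
  rw [PySem.Int.band_one, PySem.Int.mod_eq_emod_of_pos (by norm_num)]
  rw [Int.shiftRight_eq_div_pow]
  have h1 : (2:Int)^(30-i) * 2^(i+1) = 2147483648 := by
    rw [← pow_add, show 30 - i + (i+1) = 31 by omega]
    norm_num
  have hsplit : x = x % 2147483648 + (x / 2147483648 * 2^(30-i)) * 2 * 2^i := by
    have h2 := Int.emod_add_mul_ediv x 2147483648
    calc x = x % 2147483648 + 2147483648 * (x / 2147483648) := h2.symm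
    _ = _ := by rw [← h1]; ring
  have hpow : ((2:Int)^i) ≠ 0 := by positivity
  push_cast
  conv_lhs => rw [hsplit]
  rw [Int.add_mul_ediv_right _ _ hpow]
  rw [show x % 2147483648 / 2^i + x / 2147483648 * 2^(30-i) * 2
        = x % 2147483648 / 2^i + 2 * (x / 2147483648 * 2^(30-i)) from by ring,
      Int.add_mul_emod_self_left]
  unfold bitN msk
  have h3 : x % 2147483648 = ((x % 2147483648).toNat : Int) := by omega
  rw [h3]
  simp only [Int.toNat_natCast]
  norm_cast

theorem bitN_lt (y i : Nat) : bitN y i < 2 := Nat.mod_lt _ (by norm_num)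

theorem div_step (y l : Nat) : y / 2^l = 2 * (y / 2^(l+1)) + bitN y l := by
  unfold bitN; rw [pow_succ, ← Nat.div_div_eq_div_mul]; omega

theorem mod_split (a l : Nat) : a % 2^(l+1) = bitN a l * 2^l + a % 2^l := by
  unfold bitN; rw [pow_succ, Nat.mod_mul]; ring

theorem bitN_xor (a b l : Nat) : bitN (a ^^^ b) l = bitN a l ^^^ bitN b l := by
  have ha : Nat.testBit a l = decide (a / 2^l % 2 = 1) := Nat.testBit_eq_decide_div_mod_eq
  have hb : Nat.testBit b l = decide (b / 2^l % 2 = 1) := Nat.testBit_eq_decide_div_mod_eq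
  have hx : Nat.testBit (a ^^^ b) l = decide ((a ^^^ b) / 2^l % 2 = 1) := Nat.testBit_eq_decide_div_mod_eq
  have hxor := Nat.testBit_xor a b l
  have h1 := bitN_lt a l; have h2 := bitN_lt b l; have h3 := bitN_lt (a ^^^ b) l
  unfold bitN at *
  interval_cases h : (a ^^^ b) / 2^l % 2 <;> interval_cases h' : a / 2^l % 2 <;>
    interval_cases h'' : b / 2^l % 2 <;> simp_all

theorem countP_split {α : Type} (l : List α) (p q : α → Bool) :
    l.countP p = l.countP (fun a => p a && q a) + l.countP (fun a => p a && !q a) := by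
  induction l with
  | nil => rfl
  | cons x t ih =>
    simp only [List.countP_cons]
    by_cases hp : p x <;> by_cases hq : q x <;> simp [hp, hq] <;> omega

theorem piece1_iff (z mv ml l h : Nat) (hbl : bitN ml l = 1) :
    ((z / 2^(l+1) = h ∧ (z ^^^ mv) % 2^(l+1) ≤ ml % 2^(l+1)) ∧ bitN z l = bitN mv l)
      ↔ z / 2^l = 2*h + bitN mv l := by
  have hdz := div_step z l
  have m1 := mod_split (z ^^^ mv) l
  have m2 := mod_split ml l
  have m3 : (z ^^^ mv) % 2^l < 2^l := Nat.mod_lt _ (by positivity)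
  rw [hbl] at m2
  rcases (by have := bitN_lt mv l; omega : bitN mv l = 0 ∨ bitN mv l = 1) with hv | hv <;>
    rcases (by have := bitN_lt z l; omega : bitN z l = 0 ∨ bitN z l = 1) with hz | hz <;>
    (have hxzv : bitN (z ^^^ mv) l = bitN z l ^^^ bitN mv l := bitN_xor z mv l;
     rw [hv, hz] at hxzv; norm_num at hxzv; rw [hxzv] at m1) <;>
    omega

theorem piece2_iff (z mv ml l h : Nat) (hbl : bitN ml l = 1) (hh : h = (mv ^^^ ml) / 2^(l+1)) :
    ((z / 2^(l+1) = h ∧ (z ^^^ mv) % 2^(l+1) ≤ ml % 2^(l+1)) ∧ ¬ (bitN z l = bitN mv l))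
      ↔ (z / 2^l = (mv ^^^ ml)/2^l ∧ (z ^^^ mv) % 2^l ≤ ml % 2^l) := by
  have hdz := div_step z l
  have hde := div_step (mv ^^^ ml) l
  have m1 := mod_split (z ^^^ mv) l
  have m2 := mod_split ml l
  have m3 : (z ^^^ mv) % 2^l < 2^l := Nat.mod_lt _ (by positivity)
  rw [hbl] at m2
  rcases (by have := bitN_lt mv l; omega : bitN mv l = 0 ∨ bitN mv l = 1) with hv | hv <;>
    rcases (by have := bitN_lt z l; omega : bitN z l = 0 ∨ bitN z l = 1) with hz | hz <;>
    (have hxzv : bitN (z ^^^ mv) l = bitN z l ^^^ bitN mv l := bitN_xor z mv l;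
     have hxe : bitN (mv ^^^ ml) l = bitN mv l ^^^ bitN ml l := bitN_xor mv ml l;
     rw [hv, hz] at hxzv; rw [hv, hbl] at hxe; norm_num at hxzv hxe;
     rw [hxzv] at m1; rw [hxe] at hde) <;>
    omega

theorem piece_lo_iff (z mv ml l h : Nat) (hbl : bitN ml l = 0) (hh : h = (mv ^^^ ml) / 2^(l+1)) :
    (z / 2^(l+1) = h ∧ (z ^^^ mv) % 2^(l+1) ≤ ml % 2^(l+1))
      ↔ (z / 2^l = (mv ^^^ ml)/2^l ∧ (z ^^^ mv) % 2^l ≤ ml % 2^l) := by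
  have hdz := div_step z l
  have hde := div_step (mv ^^^ ml) l
  have m1 := mod_split (z ^^^ mv) l
  have m2 := mod_split ml l
  have m3 : (z ^^^ mv) % 2^l < 2^l := Nat.mod_lt _ (by positivity)
  have m4 : ml % 2^l < 2^l := Nat.mod_lt _ (by positivity)
  rw [hbl] at m2
  rcases (by have := bitN_lt mv l; omega : bitN mv l = 0 ∨ bitN mv l = 1) with hv | hv <;>
    rcases (by have := bitN_lt z l; omega : bitN z l = 0 ∨ bitN z l = 1) with hz | hz <;>
    (have hxzv : bitN (z ^^^ mv) l = bitN z l ^^^ bitN mv l := bitN_xor z mv l;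
     have hxe : bitN (mv ^^^ ml) l = bitN mv l ^^^ bitN ml l := bitN_xor mv ml l;
     rw [hv, hz] at hxzv; rw [hv, hbl] at hxe; norm_num at hxzv hxe;
     rw [hxzv] at m1; rw [hxe] at hde) <;>
    omega

theorem split_hi (ys : List Nat) (mv ml l h : Nat) (hbl : bitN ml l = 1)
    (hh : h = (mv ^^^ ml) / 2^(l+1)) :
    ys.countP (fun z => decide (z / 2^(l+1) = h ∧ (z ^^^ mv) % 2^(l+1) ≤ ml % 2^(l+1)))
      = ys.countP (fun z => decide (z / 2^l = 2*h + bitN mv l))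
      + ys.countP (fun z => decide (z / 2^l = (mv ^^^ ml)/2^l ∧ (z ^^^ mv) % 2^l ≤ ml % 2^l)) := by
  rw [countP_split ys _ (fun z => decide (bitN z l = bitN mv l))]
  congr 1
  · apply List.countP_congr; intro z _
    simp only [Bool.and_eq_true, decide_eq_true_eq]
    exact piece1_iff z mv ml l h hbl
  · apply List.countP_congr; intro z _
    simp only [Bool.and_eq_true, Bool.not_eq_eq_eq_not, Bool.not_true, decide_eq_false_iff_not,
      decide_eq_true_eq]
    exact piece2_iff z mv ml l h hbl hh

theorem split_lo (ys : List Nat) (mv ml l h : Nat) (hbl : bitN ml l = 0)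
    (hh : h = (mv ^^^ ml) / 2^(l+1)) :
    ys.countP (fun z => decide (z / 2^(l+1) = h ∧ (z ^^^ mv) % 2^(l+1) ≤ ml % 2^(l+1)))
      = ys.countP (fun z => decide (z / 2^l = (mv ^^^ ml)/2^l ∧ (z ^^^ mv) % 2^l ≤ ml % 2^l)) := by
  apply List.countP_congr; intro z _
  simp only [decide_eq_true_eq]
  exact piece_lo_iff z mv ml l h hbl hh

theorem xor_one_bit (b : Nat) (hb : b < 2) : b ^^^ 1 = 1 - b := by
  interval_cases b <;> decide

-- a node of positive depth is never index 0 (the root)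
theorem InvP.nonzero {φ : Nat → Nat → Option Nat} {s : TrieSt} {ys : List Nat}
    (h : InvP φ s ys) {k hh i : Nat} (hφ : φ k hh = some i) (hk : 0 < k) : i ≠ 0 := by
  intro h0
  have := h.inj k hh 0 0 0 (h0 ▸ hφ) h.root
  omega

theorem getD_set_self {α : Type} (l : List α) (u : Nat) (v d : α) (h : u < l.length) :
    (l.set u v).getD u d = v := by
  rw [List.getD_eq_getElem?_getD, List.getElem?_set_self]
  · rfl
  · exact h

theorem getD_set_ne {α : Type} (l : List α) (u i : Nat) (v d : α) (h : i ≠ u) :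
    (l.set u v).getD i d = l.getD i d := by
  rw [List.getD_eq_getElem?_getD, List.getElem?_set_ne (by omega), ← List.getD_eq_getElem?_getD]

theorem getD_append_self {α : Type} (l : List α) (v d : α) :
    (l ++ [v]).getD l.length d = v := by
  rw [List.getD_eq_getElem?_getD, List.getElem?_append_right (le_refl _)]
  simp

theorem InvM.nonzero {φ : Nat → Nat → Option Nat} {s : TrieSt} {ys : List Nat} {y j : Nat}
    (h : InvM φ s ys y j) {k hh i : Nat} (hφ : φ k hh = some i) (hk : 0 < k) : i ≠ 0 := by
  intro h0
  have := h.inj k hh 0 0 0 (h0 ▸ hφ) h.root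
  omega

theorem cntk_succ_le (ys : List Nat) (k w : Nat) (hk : k+1 ≤ 31) :
    cntk ys (k+1) w ≤ cntk ys k (w/2) := by
  unfold cntk
  apply List.countP_mono_left; intro z _ hp
  simp only [decide_eq_true_eq] at hp ⊢
  have h31 : (31-k) = (31-(k+1)) + 1 := by omega
  rw [h31, pow_succ, ← Nat.div_div_eq_div_mul, hp]

theorem cntk_append (ys : List Nat) (y k h : Nat) :
    cntk (ys ++ [y]) k h = cntk ys k h + (if y / 2^(31-k) = h then 1 else 0) := by
  unfold cntk
  rw [List.countP_append]
  congr 1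
  by_cases hc : y / 2^(31-k) = h <;> simp [hc]

theorem insert_start (φ : Nat → Nat → Option Nat) (s : TrieSt) (ys : List Nat) (x : Int)
    (h : InvP φ s ys) : InvM φ (trieIncCount s 0) ys (msk x) 0 := by
  have hlen0 : 0 < s.nodes.length := h.ibound 0 0 0 h.root
  have hclen := h.clen
  refine ⟨h.root, h.kbound, ?_, h.ibound, ?_, h.inj, ?_, ?_⟩
  · intro k hh hk h31 hlt
    rw [h.dom k hh hk h31 hlt]
    constructor
    · exact Or.inl
    · rintro (hc | ⟨hk0, _⟩)
      · exact hc
      · omega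
  · simp [trieIncCount, List.length_set, hclen]
  · intro k hh i hφ
    by_cases hi : i = 0
    · subst hi
      obtain ⟨rfl, rfl⟩ := h.inj k hh 0 0 0 hφ h.root
      show (s.count.set 0 (s.count.getD 0 0 + 1)).getD 0 0 = _
      rw [getD_set_self _ _ _ _ (by omega), h.cnt 0 0 0 hφ]
      have hy : msk x / 2^(31-0) = 0 := Nat.div_eq_of_lt (by simpa using msk_lt x)
      rw [if_pos ⟨le_refl 0, hy.symm⟩]
    · show (s.count.set 0 _).getD i 0 = _
      rw [getD_set_ne _ _ _ _ _ hi, h.cnt k hh i hφ]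
      have hcond : ¬ (k ≤ 0 ∧ hh = msk x / 2^(31-k)) := by
        rintro ⟨hk0, _⟩
        have hk0' : k = 0 := by omega
        subst hk0'
        have hb := h.kbound 0 hh (by rw [hφ]; rfl)
        have hh0 : hh = 0 := by have := hb.2; simpa using this
        subst hh0
        rw [h.root] at hφ
        exact hi (by injection hφ; omega)
      rw [if_neg hcond, add_zero]
  · intro k hh i b hφ hb
    exact h.child k hh i b hφ hb

theorem insert_done (φ : Nat → Nat → Option Nat) (s : TrieSt) (ys : List Nat) (y : Nat)
    (hy : y < 2^31) (hys : ∀ z ∈ ys, z < 2^31) (h : InvM φ s ys y 31) :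
    InvP φ s (ys ++ [y]) := by
  refine ⟨h.root, h.kbound, ?_, h.ibound, h.clen, h.inj, ?_, h.child, ?_⟩
  · intro k hh hk h31 hlt
    rw [h.dom k hh hk h31 hlt, cntk_append]
    by_cases hc : y / 2^(31-k) = hh <;> simp [hc] <;> omega
  · intro k hh i hφ
    rw [h.cnt k hh i hφ, cntk_append]
    have h31 : k ≤ 31 := (h.kbound k hh (by rw [hφ]; rfl)).1
    by_cases hc : y / 2^(31-k) = hh
    · rw [if_pos hc, if_pos ⟨h31, hc.symm⟩]
      push_cast; ring
    · rw [if_neg hc, if_neg (by rintro ⟨_, hc'⟩; exact hc hc'.symm)]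
      simp
  · intro z hz
    rcases List.mem_append.mp hz with hz | hz
    · exact hys z hz
    · simp at hz; omega

theorem insert_loop (x : Int) (ys : List Nat) :
    ∀ (lvl : Nat), lvl ≤ 31 → ∀ (φ : Nat → Nat → Option Nat) (s : TrieSt) (u : Nat),
      InvM φ s ys (msk x) (31 - lvl) → φ (31 - lvl) (msk x / 2^lvl) = some u →
      ∃ φ', InvM φ' (trieInsertLoop s u x lvl) ys (msk x) 31 := by
  intro lvl
  induction lvl with
  | zero =>
    intro _ φ s u hM _
    exact ⟨φ, by simpa using hM⟩
  | succ lvl ih =>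
    intro hlvl φ s u hM hphi
    have hlt31 : lvl < 31 := by omega
    have hkk : 31 - (lvl+1) + 1 = 31 - lvl := by omega
    have hlvlarr : 31 - (31 - lvl) = lvl := by omega
    have hKpos : 0 < 31 - lvl := by omega
    have hylt := msk_lt x
    have hb2 := bitN_lt (msk x) lvl
    have hds := div_step (msk x) lvl
    have hkb := hM.kbound _ _ (by rw [hphi]; rfl)
    have hp2 : (2:Nat)^(31-lvl) = 2^(31-(lvl+1)) * 2 := by rw [← pow_succ, hkk]
    have hApow : 2*(msk x/2^(lvl+1)) + bitN (msk x) lvl < 2^(31-lvl) := by omega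
    have hulen : u < s.nodes.length := hM.ibound _ _ _ hphi
    have hclen := hM.clen
    simp only [trieInsertLoop]
    rw [band_shift_bit x lvl hlt31]
    have hch := hM.child _ _ _ (bitN (msk x) lvl) hphi hb2
    rw [hkk] at hch
    cases hC : φ (31-lvl) (2*(msk x/2^(lvl+1)) + bitN (msk x) lvl) with
    | some c =>
      have hceq : trieChild s u ((bitN (msk x) lvl : Nat) : Int) = c := by rw [hch, hC]; rfl
      have hcne : c ≠ 0 := hM.nonzero hC hKpos
      rw [if_neg (by rw [hceq]; exact hcne), hceq]
      have hM2 : InvM φ (trieIncCount s c) ys (msk x) (31 - lvl) := by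
        refine ⟨hM.root, hM.kbound, ?_, hM.ibound, ?_, hM.inj, ?_, ?_⟩
        · intro k hh hk h31 hlt
          rw [hM.dom k hh hk h31 hlt]
          constructor
          · rintro (hc | ⟨hk0, hh0⟩)
            · exact Or.inl hc
            · exact Or.inr ⟨by omega, hh0⟩
          · rintro (hc | ⟨hkK, hhy⟩)
            · exact Or.inl hc
            · by_cases hkJ : k ≤ 31 - (lvl+1)
              · exact Or.inr ⟨hkJ, hhy⟩
              · -- k = 31 - lvl, hh = x's path: that node already existed (hC), so its count is positive
                left
                have hkK' : k = 31 - lvl := by omega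
                subst hkK'
                rw [hlvlarr] at hhy
                have hex := (hM.dom (31-lvl) _ hKpos (by omega) hApow).mp (by rw [hC]; rfl)
                rcases hex with hc' | ⟨hK, _⟩
                · rw [hhy, hds]; exact hc'
                · omega
        · simp [trieIncCount, List.length_set, hclen]
        · intro k hh i hφ
          have hclt : c < s.count.length := by rw [hclen]; exact hM.ibound _ _ _ hC
          by_cases hic : i = c
          · subst hic
            obtain ⟨rfl, rfl⟩ := hM.inj _ _ _ _ _ hφ hC
            show (s.count.set i (s.count.getD i 0 + 1)).getD i 0 = _
            rw [getD_set_self _ _ _ _ hclt, hM.cnt _ _ _ hC]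
            rw [if_neg (by omega), if_pos ⟨le_refl _, by rw [hlvlarr]; omega⟩]
            ring
          · show (s.count.set c _).getD i 0 = _
            rw [getD_set_ne _ _ _ _ _ hic, hM.cnt k hh i hφ]
            congr 1
            by_cases hcnd : k ≤ 31 - (lvl+1) ∧ hh = msk x / 2^(31-k)
            · rw [if_pos hcnd, if_pos ⟨by omega, hcnd.2⟩]
            · rw [if_neg hcnd]
              by_cases hcnd2 : k ≤ 31 - lvl ∧ hh = msk x / 2^(31-k)
              · exfalso
                have hkK : k = 31 - lvl := by omega
                subst hkK
                rw [hlvlarr] at hcnd2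
                have : φ (31-lvl) (msk x / 2^lvl) = some i := by rw [← hcnd2.2]; exact hφ
                rw [hds] at this
                rw [hC] at this
                injection this with hci
                exact hic hci.symm
              · rw [if_neg hcnd2]
        · intro k hh i b hφ hb
          exact hM.child k hh i b hφ hb
      have hphi2 : φ (31-lvl) (msk x / 2^lvl) = some c := by rw [hds]; exact hC
      exact ih (by omega) φ (trieIncCount s c) c hM2 hphi2
    | none =>
      have hceq : trieChild s u ((bitN (msk x) lvl : Nat) : Int) = 0 := by rw [hch, hC]; rfl
      rw [hceq, if_pos rfl]
      have hcntA0 : cntk ys (31-lvl) (2*(msk x/2^(lvl+1)) + bitN (msk x) lvl) = 0 := by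
        have hdom := hM.dom (31-lvl) _ hKpos (by omega) hApow
        rw [hC] at hdom
        simp only [Option.isSome_none, Bool.false_eq_true, false_iff, not_or] at hdom
        omega
      -- the updated node pair at u, and the appended fresh node
      have hgetu : ((s.nodes.set u (trieSetChild (s.nodes.getD u (0,0)) ((bitN (msk x) lvl : Nat) : Int) s.nodes.length)) ++ [(0,0)]).getD u (0,0)
          = trieSetChild (s.nodes.getD u (0,0)) ((bitN (msk x) lvl : Nat) : Int) s.nodes.length := by
        rw [List.getD_append _ _ _ _ (by rw [List.length_set]; exact hulen)]
        exact getD_set_self _ _ _ _ hulen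
      have hu' : trieChild ({ nodes := (s.nodes.set u (trieSetChild (s.nodes.getD u (0,0)) ((bitN (msk x) lvl : Nat) : Int) s.nodes.length)) ++ [(0,0)], count := s.count ++ [0] } : TrieSt) u ((bitN (msk x) lvl : Nat) : Int) = s.nodes.length := by
        show (if ((bitN (msk x) lvl : Nat) : Int) = 1 then _ else _) = _
        rw [hgetu]
        rcases (by omega : bitN (msk x) lvl = 0 ∨ bitN (msk x) lvl = 1) with hb | hb <;>
          simp [trieSetChild, hb]
      rw [hu']
      set M := s.nodes.length with hM0
      -- new path map: the fresh node sits at x's path of depth 31-lvl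
      set φ' : Nat → Nat → Option Nat := fun k h =>
        if k = 31-lvl ∧ h = 2*(msk x/2^(lvl+1)) + bitN (msk x) lvl then some M else φ k h with hφ'
      have hφ'old : ∀ k h, ¬ (k = 31-lvl ∧ h = 2*(msk x/2^(lvl+1)) + bitN (msk x) lvl) → φ' k h = φ k h := by
        intro k h hn; simp only [hφ']; simp [hn]
      have hφ'new : φ' (31-lvl) (2*(msk x/2^(lvl+1)) + bitN (msk x) lvl) = some M := by
        simp only [hφ']; simp
      have hφ'someold : ∀ k h i, φ' k h = some i → i ≠ M → φ k h = some i := by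
        intro k h i hsome hiM
        by_cases hn : k = 31-lvl ∧ h = 2*(msk x/2^(lvl+1)) + bitN (msk x) lvl
        · simp only [hφ'] at hsome; rw [if_pos hn] at hsome
          exact absurd (by injection hsome; omega) hiM
        · rw [hφ'old k h hn] at hsome; exact hsome
      have hMc : M = s.count.length := hclen.symm
      have hgetM0 : (s.count ++ [0]).getD M 0 = (0:Int) := by
        rw [hMc]; exact getD_append_self _ _ _
      have hlenN : ((s.nodes.set u (trieSetChild (s.nodes.getD u (0,0)) ((bitN (msk x) lvl : Nat) : Int) M)) ++ [(0,0)]).length = M + 1 := by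
        rw [List.length_append, List.length_set]; rfl
      have hgetNM : ((s.nodes.set u (trieSetChild (s.nodes.getD u (0,0)) ((bitN (msk x) lvl : Nat) : Int) M)) ++ [(0,0)]).getD M (0,0) = ((0:Nat),(0:Nat)) := by
        have hlenset : (s.nodes.set u (trieSetChild (s.nodes.getD u (0,0)) ((bitN (msk x) lvl : Nat) : Int) M)).length = M := by
          rw [List.length_set]
        have h0 := getD_append_self (s.nodes.set u (trieSetChild (s.nodes.getD u (0,0)) ((bitN (msk x) lvl : Nat) : Int) M)) ((0:Nat),(0:Nat)) ((0:Nat),(0:Nat))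
        rw [hlenset] at h0
        exact h0
      have hgetNu : ((s.nodes.set u (trieSetChild (s.nodes.getD u (0,0)) ((bitN (msk x) lvl : Nat) : Int) M)) ++ [(0,0)]).getD u (0,0) = trieSetChild (s.nodes.getD u (0,0)) ((bitN (msk x) lvl : Nat) : Int) M := hgetu
      have hgetNold : ∀ i, i ≠ u → i < M → ((s.nodes.set u (trieSetChild (s.nodes.getD u (0,0)) ((bitN (msk x) lvl : Nat) : Int) M)) ++ [(0,0)]).getD i (0,0) = s.nodes.getD i (0,0) := by
        intro i hiu hiM
        rw [List.getD_append _ _ _ _ (by rw [List.length_set]; exact hiM)]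
        exact getD_set_ne _ _ _ _ _ hiu
      have hgetC2M : ((s.count ++ [0]).set M ((s.count ++ [0]).getD M 0 + 1)).getD M 0 = (1:Int) := by
        rw [getD_set_self _ _ _ _ (by simp only [List.length_append, List.length_cons, List.length_nil, ← hMc]; omega), hgetM0]
        norm_num
      have hgetC2old : ∀ i, i ≠ M → i < M → ((s.count ++ [0]).set M ((s.count ++ [0]).getD M 0 + 1)).getD i 0 = s.count.getD i 0 := by
        intro i hiM hilt
        rw [getD_set_ne _ _ _ _ _ hiM]
        exact List.getD_append _ _ _ _ (by omega)
      refine ih (by omega) φ' _ M ?_ ?_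
      · -- the representation invariant for the state with the fresh node
        simp only [trieIncCount]
        refine ⟨?_, ?_, ?_, ?_, ?_, ?_, ?_, ?_⟩
        · rw [hφ'old 0 0 (by omega)]; exact hM.root
        · intro k hh hsome
          by_cases hn : k = 31-lvl ∧ hh = 2*(msk x/2^(lvl+1)) + bitN (msk x) lvl
          · exact ⟨by rw [hn.1]; omega, by rw [hn.2, hn.1]; exact hApow⟩
          · rw [hφ'old k hh hn] at hsome; exact hM.kbound k hh hsome
        · intro k hh hk h31 hlt
          by_cases hn : k = 31-lvl ∧ hh = 2*(msk x/2^(lvl+1)) + bitN (msk x) lvl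
          · simp only [hφ'] ; rw [if_pos hn]
            simp only [Option.isSome_some, true_iff]
            have h1 : k ≤ 31 - lvl := le_of_eq hn.1
            have h2 : hh = msk x / 2^(31-k) := by
              rw [hn.1, hlvlarr, hds]
              exact hn.2
            exact Or.inr ⟨h1, h2⟩
          · rw [hφ'old k hh hn, hM.dom k hh hk h31 hlt]
            constructor
            · rintro (hc | ⟨hk0, hh0⟩)
              · exact Or.inl hc
              · exact Or.inr ⟨by omega, hh0⟩
            · rintro (hc | ⟨hkK, hhy⟩)
              · exact Or.inl hc
              · by_cases hkJ : k ≤ 31 - (lvl+1)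
                · exact Or.inr ⟨hkJ, hhy⟩
                · exfalso
                  have hkK' : k = 31 - lvl := by omega
                  exact hn ⟨hkK', by rw [hkK', hlvlarr] at hhy; rw [hhy]; exact hds⟩
        · intro k hh i hsome
          simp only [hlenN]
          by_cases hiM : i = M
          · omega
          · have := hM.ibound k hh i (hφ'someold k hh i hsome hiM)
            omega
        · simp only [List.length_set, hlenN, List.length_append, List.length_cons, List.length_nil]
          omega
        · intro k hh k' hh' i h1 h2
          by_cases hiM : i = M
          · subst hiM
            have hn1 : k = 31-lvl ∧ hh = 2*(msk x/2^(lvl+1)) + bitN (msk x) lvl := by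
              by_contra hn
              rw [hφ'old k hh hn] at h1
              have := hM.ibound _ _ _ h1
              omega
            have hn2 : k' = 31-lvl ∧ hh' = 2*(msk x/2^(lvl+1)) + bitN (msk x) lvl := by
              by_contra hn
              rw [hφ'old k' hh' hn] at h2
              have := hM.ibound _ _ _ h2
              omega
            omega
          · exact hM.inj k hh k' hh' i (hφ'someold _ _ _ h1 hiM) (hφ'someold _ _ _ h2 hiM)
        · intro k hh i hsome
          by_cases hn : k = 31-lvl ∧ hh = 2*(msk x/2^(lvl+1)) + bitN (msk x) lvl
          · have hiM : i = M := by
              simp only [hφ'] at hsome; rw [if_pos hn] at hsome; injection hsome; omega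
            subst hiM
            show ((s.count ++ [0]).set M ((s.count ++ [0]).getD M 0 + 1)).getD M 0 = _
            rw [hgetC2M, hn.1, hn.2, hcntA0]
            rw [if_pos ⟨le_refl _, by rw [hlvlarr]; exact hds.symm⟩]
            simp
          · have hold := hφ'someold k hh i hsome (by
              intro hiM
              subst hiM
              rw [hφ'old k hh hn] at hsome
              have := hM.ibound _ _ _ hsome; omega)
            have hiltM : i < M := hM.ibound _ _ _ hold
            have hiM : i ≠ M := by omega
            show ((s.count ++ [0]).set M ((s.count ++ [0]).getD M 0 + 1)).getD i 0 = _
            rw [hgetC2old i hiM hiltM, hM.cnt k hh i hold]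
            congr 1
            by_cases hcnd : k ≤ 31 - (lvl+1) ∧ hh = msk x / 2^(31-k)
            · rw [if_pos hcnd, if_pos ⟨by omega, hcnd.2⟩]
            · rw [if_neg hcnd]
              by_cases hcnd2 : k ≤ 31 - lvl ∧ hh = msk x / 2^(31-k)
              · exfalso
                have hkK : k = 31 - lvl := by omega
                exact hn ⟨hkK, by
                  have := hcnd2.2
                  rw [hkK, hlvlarr] at this
                  rw [this]; exact hds⟩
              · rw [if_neg hcnd2]
        · intro k hh i b' hsome hb'
          by_cases hn : k = 31-lvl ∧ hh = 2*(msk x/2^(lvl+1)) + bitN (msk x) lvl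
          · -- the fresh node: both children are absent, and no deeper path exists yet
            have hiM : i = M := by
              simp only [hφ'] at hsome; rw [if_pos hn] at hsome; injection hsome; omega
            subst hiM
            have hchM : trieChild ({ nodes := (s.nodes.set u (trieSetChild (s.nodes.getD u (0,0)) ((bitN (msk x) lvl : Nat) : Int) M)) ++ [(0,0)], count := ((s.count ++ [0]).set M ((s.count ++ [0]).getD M 0 + 1)) } : TrieSt) M ((b' : Nat) : Int) = 0 := by
              show (if ((b' : Nat) : Int) = 1 then _ else _) = _
              rw [hgetNM]
              rcases (by omega : b' = 0 ∨ b' = 1) with hb | hb <;> simp [hb]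
            rw [hchM]
            have hnone : φ' (k+1) (2*hh + b') = none := by
              rw [hφ'old _ _ (by omega)]
              cases hX : φ (k+1) (2*hh + b') with
              | none => rfl
              | some c'' =>
                exfalso
                have hkb2 := hM.kbound _ _ (by rw [hX]; rfl)
                by_cases hk31 : k + 1 ≤ 31
                · have hk1pos : 0 < k + 1 := by omega
                  have hdom := hM.dom (k+1) (2*hh + b') hk1pos hk31 hkb2.2
                  rw [hX] at hdom
                  simp only [Option.isSome_some, true_iff] at hdom
                  rcases hdom with hc' | ⟨hkj, _⟩
                  · have hle := cntk_succ_le ys k (2*hh + b') hk31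
                    have hdd : (2*hh + b') / 2 = hh := by omega
                    have hA0' : cntk ys (31-lvl) hh = 0 := by rw [hn.2]; exact hcntA0
                    rw [hdd, hn.1] at hle
                    rw [hn.1] at hc'
                    omega
                  · omega
                · omega
            rw [hnone]
            rfl
          · have hold := hφ'someold k hh i hsome (by
              intro hiM
              subst hiM
              rw [hφ'old k hh hn] at hsome
              have := hM.ibound _ _ _ hsome; omega)
            have hiltM : i < M := hM.ibound _ _ _ hold
            by_cases hisu : k = 31 - (lvl+1) ∧ hh = msk x / 2^(lvl+1)
            · -- the node being extended: one child becomes the fresh node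
              have hiu : u = i := by
                have h1 : φ k hh = some u := by rw [hisu.1, hisu.2]; exact hphi
                rw [hold] at h1
                injection h1 with h2
                exact h2.symm
              subst hiu
              have hchv : ∀ b'' : Nat, b'' < 2 → trieChild ({ nodes := (s.nodes.set u (trieSetChild (s.nodes.getD u (0,0)) ((bitN (msk x) lvl : Nat) : Int) M)) ++ [(0,0)], count := ((s.count ++ [0]).set M ((s.count ++ [0]).getD M 0 + 1)) } : TrieSt) u ((b'' : Nat) : Int)
                  = (if b'' = bitN (msk x) lvl then M else trieChild s u ((b'' : Nat) : Int)) := by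
                intro b'' hb''
                show (if ((b'' : Nat) : Int) = 1 then _ else _) = _
                rw [hgetNu]
                show (if ((b'' : Nat) : Int) = 1 then (trieSetChild _ _ _).2 else (trieSetChild _ _ _).1) = _
                rcases (by omega : b'' = 0 ∨ b'' = 1) with hbb | hbb <;>
                  rcases (by omega : bitN (msk x) lvl = 0 ∨ bitN (msk x) lvl = 1) with hbx | hbx <;>
                  simp [hbb, hbx, trieSetChild, trieChild]
              rw [hchv b' hb']
              by_cases hbeq : b' = bitN (msk x) lvl
              · rw [if_pos hbeq]
                have : φ' (k+1) (2*hh + b') = some M := by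
                  rw [show k+1 = 31-lvl from by omega, show 2*hh + b' = 2*(msk x/2^(lvl+1)) + bitN (msk x) lvl from by rw [hisu.2, hbeq]]
                  exact hφ'new
                rw [this]
                rfl
              · rw [if_neg hbeq]
                have hcold := hM.child _ _ _ b' hold hb'
                rw [hcold]
                congr 1
                rw [hφ'old _ _ (by
                  rintro ⟨hk1, hh1⟩
                  exact hbeq (by
                    rw [hisu.2] at hh1
                    omega))]
            · -- an untouched node: nothing changed
              have hiu : i ≠ u := by
                intro hiu
                subst hiu
                exact hisu (hM.inj _ _ _ _ _ hold hphi)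
              have hcho : trieChild ({ nodes := (s.nodes.set u (trieSetChild (s.nodes.getD u (0,0)) ((bitN (msk x) lvl : Nat) : Int) M)) ++ [(0,0)], count := ((s.count ++ [0]).set M ((s.count ++ [0]).getD M 0 + 1)) } : TrieSt) i ((b' : Nat) : Int)
                  = trieChild s i ((b' : Nat) : Int) := by
                show (if ((b' : Nat) : Int) = 1 then _ else _) = _
                rw [hgetNold i hiu hiltM]
                rfl
              rw [hcho, hM.child _ _ _ b' hold hb']
              congr 1
              rw [hφ'old _ _ (by
                rintro ⟨hk1, hh1⟩
                apply hisu
                constructor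
                · omega
                · omega)]
      · rw [hds]
        exact hφ'new

theorem query_loop (φ : Nat → Nat → Option Nat) (s : TrieSt) (ys : List Nat)
    (val limit : Int) (h : InvP φ s ys) :
    ∀ (lvl : Nat), lvl ≤ 31 → ∀ (u : Nat) (cnt0 : Int),
      φ (31-lvl) ((msk val ^^^ msk limit) / 2^lvl) = some u →
      trieQueryLoop s u val limit cnt0 lvl
        = cnt0 + ((ys.countP (fun z => decide (z / 2^lvl = (msk val ^^^ msk limit) / 2^lvl ∧
            (z ^^^ msk val) % 2^lvl ≤ msk limit % 2^lvl)) : Nat) : Int) := by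
  intro lvl
  induction lvl with
  | zero =>
    intro _ u cnt0 hphi
    have hu0 : u ≠ 0 := h.nonzero hphi (by norm_num)
    have hcnt := h.cnt _ _ _ hphi
    simp only [trieQueryLoop, hu0, ne_eq, not_false_eq_true, if_pos]
    rw [hcnt]
    congr 1
    unfold cntk
    congr 1
    apply List.countP_congr; intro z _
    simp only [show (31:Nat) - 31 = 0 from rfl, pow_zero, Nat.div_one, Nat.mod_one,
      decide_eq_true_eq]
    omega
  | succ lvl ih =>
    intro hlvl u cnt0 hphi
    have hlt31 : lvl < 31 := by omega
    have hkk : 31 - (lvl+1) + 1 = 31 - lvl := by omega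
    have harr : 31 - (31 - lvl) = lvl := by omega
    have hkpos : 0 < 31 - lvl := by omega
    have hbv2 := bitN_lt (msk val) lvl
    have hbl2 := bitN_lt (msk limit) lvl
    have he31 : msk val ^^^ msk limit < 2^31 := Nat.xor_lt_two_pow (msk_lt val) (msk_lt limit)
    have hp2 : (2:Nat)^(31-lvl) = 2^(31-(lvl+1)) * 2 := by rw [← pow_succ, hkk]
    have heh : (msk val ^^^ msk limit) / 2^lvl < 2^(31-lvl) := by
      rw [Nat.div_lt_iff_lt_mul (by positivity)]
      calc msk val ^^^ msk limit < 2^31 := he31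
      _ ≤ 2^(31-lvl) * 2^lvl := by rw [← pow_add, show 31-lvl+lvl = 31 by omega]
    have hkb := h.kbound _ _ (by rw [hphi]; rfl)
    have hde := div_step (msk val ^^^ msk limit) lvl
    have hxe : bitN (msk val ^^^ msk limit) lvl = bitN (msk val) lvl ^^^ bitN (msk limit) lvl :=
      bitN_xor _ _ lvl
    simp only [trieQueryLoop]
    rw [band_shift_bit val lvl hlt31, band_shift_bit limit lvl hlt31]
    have hcast1 : (1:Int) - ((bitN (msk val) lvl : Nat) : Int) = ((1 - bitN (msk val) lvl : Nat) : Int) := by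
      omega
    have hchL := h.child _ _ _ (bitN (msk val) lvl) hphi (bitN_lt _ lvl)
    rw [hkk] at hchL
    have hchE := h.child _ _ _ (1 - bitN (msk val) lvl) hphi (by omega)
    rw [hkk] at hchE
    rcases (by omega : bitN (msk limit) lvl = 0 ∨ bitN (msk limit) lvl = 1) with hbl | hbl
    · -- limit bit 0: walk to the v_bit child, nothing added
      rw [if_neg (by omega : ¬ ((bitN (msk limit) lvl : Nat) : Int) = 1)]
      have hA : 2*((msk val ^^^ msk limit)/2^(lvl+1)) + bitN (msk val) lvl
          = (msk val ^^^ msk limit)/2^lvl := by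
        rw [hbl, Nat.xor_zero] at hxe; omega
      rw [split_lo ys (msk val) (msk limit) lvl _ hbl rfl]
      cases hU : φ (31-lvl) ((msk val ^^^ msk limit)/2^lvl) with
      | none =>
        have hc0 : trieChild s u ((bitN (msk val) lvl : Nat) : Int) = 0 := by
          rw [hchL, hA, hU]; rfl
        rw [if_pos hc0]
        have hdom := h.dom (31-lvl) _ hkpos (by omega) heh
        rw [hU] at hdom
        simp only [Option.isSome_none, Bool.false_eq_true, false_iff, Nat.not_lt,
          Nat.le_zero] at hdom
        have hle : ys.countP (fun z => decide (z/2^lvl = (msk val ^^^ msk limit)/2^lvl ∧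
            (z ^^^ msk val)%2^lvl ≤ msk limit %2^lvl)) ≤ cntk ys (31-lvl) ((msk val ^^^ msk limit)/2^lvl) := by
          unfold cntk; rw [harr]
          apply List.countP_mono_left; intro z _ hp
          simp only [decide_eq_true_eq] at hp ⊢; exact hp.1
        omega
      | some c =>
        have hcne : c ≠ 0 := h.nonzero hU hkpos
        have hcc : trieChild s u ((bitN (msk val) lvl : Nat) : Int) = c := by
          rw [hchL, hA, hU]; rfl
        rw [hcc, if_neg hcne]
        exact ih (by omega) c cnt0 hU
    · -- limit bit 1: count the whole v_bit subtree, walk to the other child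
      rw [if_pos (by omega : ((bitN (msk limit) lvl : Nat) : Int) = 1)]
      have hB : 2*((msk val ^^^ msk limit)/2^(lvl+1)) + (1 - bitN (msk val) lvl)
          = (msk val ^^^ msk limit)/2^lvl := by
        rw [hbl, xor_one_bit _ hbv2] at hxe; omega
      have hAlt : 2*((msk val ^^^ msk limit)/2^(lvl+1)) + bitN (msk val) lvl < 2^(31-lvl) := by
        omega
      rw [split_hi ys (msk val) (msk limit) lvl _ hbl rfl]
      have hcntA : ∀ cnt' : Int,
          (if trieChild s u ((bitN (msk val) lvl : Nat) : Int) ≠ 0 then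
              cnt' + s.count.getD (trieChild s u ((bitN (msk val) lvl : Nat) : Int)) 0 else cnt')
            = cnt' + (ys.countP (fun z => decide (z / 2^lvl
                = 2*((msk val ^^^ msk limit)/2^(lvl+1)) + bitN (msk val) lvl)) : Int) := by
        intro cnt'
        cases hLc : φ (31-lvl) (2*((msk val ^^^ msk limit)/2^(lvl+1)) + bitN (msk val) lvl) with
        | none =>
          have hc0 : trieChild s u ((bitN (msk val) lvl : Nat) : Int) = 0 := by
            rw [hchL, hLc]; rfl
          rw [if_neg (by simp [hc0])]
          have hdom := h.dom (31-lvl) _ hkpos (by omega) hAlt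
          rw [hLc] at hdom
          simp only [Option.isSome_none, Bool.false_eq_true, false_iff, Nat.not_lt,
            Nat.le_zero] at hdom
          unfold cntk at hdom; rw [harr] at hdom
          rw [hdom]
          simp
        | some c =>
          have hcne : c ≠ 0 := h.nonzero hLc hkpos
          have hcc : trieChild s u ((bitN (msk val) lvl : Nat) : Int) = c := by
            rw [hchL, hLc]; rfl
          rw [hcc, if_pos hcne]
          have := h.cnt _ _ _ hLc
          unfold cntk at this; rw [harr] at this
          rw [this]
      rw [hcast1] at *
      cases hU : φ (31-lvl) ((msk val ^^^ msk limit)/2^lvl) with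
      | none =>
        have hc0 : trieChild s u ((1 - bitN (msk val) lvl : Nat) : Int) = 0 := by
          rw [hchE, hB, hU]; rfl
        rw [hcntA, if_pos hc0]
        have hdom := h.dom (31-lvl) _ hkpos (by omega) heh
        rw [hU] at hdom
        simp only [Option.isSome_none, Bool.false_eq_true, false_iff, Nat.not_lt,
          Nat.le_zero] at hdom
        have hle : ys.countP (fun z => decide (z/2^lvl = (msk val ^^^ msk limit)/2^lvl ∧
            (z ^^^ msk val)%2^lvl ≤ msk limit %2^lvl)) ≤ cntk ys (31-lvl) ((msk val ^^^ msk limit)/2^lvl) := by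
          unfold cntk; rw [harr]
          apply List.countP_mono_left; intro z _ hp
          simp only [decide_eq_true_eq] at hp ⊢; exact hp.1
        push_cast
        omega
      | some c =>
        have hcne : c ≠ 0 := h.nonzero hU hkpos
        have hcc : trieChild s u ((1 - bitN (msk val) lvl : Nat) : Int) = c := by
          rw [hchE, hB, hU]; rfl
        rw [hcntA, hcc, if_neg hcne]
        rw [ih (by omega) c _ hU]
        push_cast
        ring

theorem query_lemma (φ : Nat → Nat → Option Nat) (s : TrieSt) (ys : List Nat)
    (val limit : Int) (h : InvP φ s ys) :
    trieQueryLoop s 0 val limit 0 31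
      = (ys.countP (fun z => decide (z ^^^ msk val ≤ msk limit)) : Int) := by
  have h0 : φ (31-31) ((msk val ^^^ msk limit) / 2^31) = some 0 := by
    have he : (msk val ^^^ msk limit) / 2^31 = 0 :=
      Nat.div_eq_of_lt (Nat.xor_lt_two_pow (msk_lt val) (msk_lt limit))
    rw [he]; exact h.root
  have := query_loop φ s ys val limit h 31 (le_refl 31) 0 0 h0
  rw [this, zero_add]
  congr 1
  apply List.countP_congr; intro z hz
  simp only [decide_eq_true_eq]
  have hzlt : z < 2^31 := h.ybound z hz
  have hxlt : z ^^^ msk val < 2^31 := Nat.xor_lt_two_pow hzlt (msk_lt val)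
  have hml : msk limit < 2^31 := msk_lt limit
  rw [Nat.div_eq_of_lt hzlt, Nat.div_eq_of_lt (Nat.xor_lt_two_pow (msk_lt val) (msk_lt limit)),
      Nat.mod_eq_of_lt hxlt, Nat.mod_eq_of_lt hml]
  simp

theorem insert_lemma (φ : Nat → Nat → Option Nat) (s : TrieSt) (ys : List Nat) (x : Int)
    (h : InvP φ s ys) : ∃ φ', InvP φ' (trieInsert s x) (ys ++ [msk x]) := by
  unfold trieInsert
  have hM0 := insert_start φ s ys x h
  have hphi : φ (31-31) (msk x / 2^31) = some 0 := by
    rw [show (31:Nat)-31 = 0 from rfl, Nat.div_eq_of_lt (msk_lt x)]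
    exact h.root
  obtain ⟨φ', hM'⟩ := insert_loop x ys 31 (le_refl _) φ (trieIncCount s 0) 0 hM0 hphi
  exact ⟨φ', insert_done φ' _ ys (msk x) (msk_lt x) h.ybound hM'⟩

theorem base_invP : InvP (fun k h => if k = 0 ∧ h = 0 then some 0 else none) ⟨[(0,0)], [0]⟩ [] := by
  refine ⟨?_, ?_, ?_, ?_, rfl, ?_, ?_, ?_, ?_⟩
  · simp
  · intro k h hs
    by_cases hc : k = 0 ∧ h = 0
    · obtain ⟨rfl, rfl⟩ := hc
      exact ⟨by omega, by norm_num⟩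
    · simp [hc] at hs
  · intro k h hk _ _
    have hc : ¬(k = 0 ∧ h = 0) := by omega
    simp [hc, cntk]
  · intro k h i hs
    by_cases hc : k = 0 ∧ h = 0
    · simp only [hc, and_self, if_true] at hs
      injection hs with hs'
      simp [← hs']
    · simp [hc] at hs
  · intro k h k' h' i h1 h2
    by_cases hc : k = 0 ∧ h = 0
    · by_cases hc' : k' = 0 ∧ h' = 0
      · omega
      · simp [hc'] at h2
    · simp [hc] at h1
  · intro k h i hs
    by_cases hc : k = 0 ∧ h = 0
    · obtain ⟨rfl, rfl⟩ := hc
      simp only [and_self, if_true] at hs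
      injection hs with hs'
      simp [← hs', cntk]
    · simp [hc] at hs
  · intro k h i b hs hb
    by_cases hc : k = 0 ∧ h = 0
    · obtain ⟨rfl, rfl⟩ := hc
      simp only [and_self, if_true] at hs
      injection hs with hs'
      have hc2 : ¬(0+1 = 0 ∧ 2*0 + b = 0) := by omega
      simp only [hc2, if_false]
      show trieChild _ i _ = (Option.none).getD 0
      rw [← hs']
      rcases (by omega : b = 0 ∨ b = 1) with hbb | hbb <;> simp [trieChild, hbb]
    · simp [hc] at hs
  · intro y hy
    simp at hy

-- values stored in the trie after processing prefixes 0..t-1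
def ysOf (pref : List Int) (t : Nat) : List Nat := (pref.take t).map msk

theorem ysOf_succ (pref : List Int) (t : Nat) (ht : t < pref.length) :
    ysOf pref (t+1) = ysOf pref t ++ [msk pref[t]] := by
  unfold ysOf
  rw [List.take_succ, List.getElem?_eq_getElem ht, List.map_append]
  rfl

theorem inner_lemma (pref : List Int) (mN pjN : Nat) :
    ∀ t : Nat, t ≤ pref.length → ∀ total : Int,
      (PySem.List.pyRange 0 (t:Int)).foldl (bInner pref 2147483647 (mN : Int) (pjN : Int)) total
        = total + ((ysOf pref t).countP (fun z => decide (z ^^^ pjN ≤ mN)) : Int) := by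
  intro t
  induction t with
  | zero =>
    intro _ total
    rw [show ((0:Nat):Int) = 0 from rfl, PySem.List.pyRange_one_eq_nil (le_refl 0)]
    simp [ysOf]
  | succ t ih =>
    intro hle total
    have h1 : ((t+1 : Nat) : Int) = (t:Int) + 1 := by push_cast; ring
    rw [h1, PySem.List.pyRange_one_succ_right (by positivity), List.foldl_append]
    rw [ih (by omega) total]
    have htlt : t < pref.length := by omega
    simp only [List.foldl_cons, List.foldl_nil]
    unfold bInner
    have hg : PySem.List.pyGetD pref (t:Int) 0 = pref[t] := by
      rw [PySem.List.pyGetD_of_nonneg pref 0 (by positivity), Int.toNat_natCast]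
      exact List.getD_eq_getElem pref 0 htlt
    rw [hg, band_mask, PySem.Int.bxor_natCast]
    rw [ysOf_succ pref t htlt, List.countP_append]
    by_cases hcmp : msk (pref[t]) ^^^ pjN ≤ mN
    · rw [if_pos (by exact_mod_cast hcmp)]
      simp only [List.countP_cons, List.countP_nil, decide_eq_true_eq, hcmp, if_pos]
      push_cast; ring
    · rw [if_neg (by exact_mod_cast hcmp)]
      simp [hcmp]

theorem fold_sync (mid : Int) (pref : List Int) (n : Int) (hlen : n < (pref.length : Int)) :
    ∀ (fuel : Nat) (j : Int), j + fuel = n + 1 → 1 ≤ j →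
      ∀ (total : Int) (s : TrieSt) (φ : Nat → Nat → Option Nat),
        InvP φ s (ysOf pref j.toNat) →
        ((PySem.List.pyRange j (n+1)).foldl (aBody mid pref) (total, s)).1
          = (PySem.List.pyRange j (n+1)).foldl (bOuter pref 2147483647 (PySem.Int.band mid 2147483647)) total := by
  intro fuel
  induction fuel with
  | zero =>
    intro j hj h1 total s φ hInv
    rw [PySem.List.pyRange_one_eq_nil (by omega)]
    rfl
  | succ f ih =>
    intro j hj h1 total s φ hInv
    rw [PySem.List.pyRange_one_cons (by omega)]
    simp only [List.foldl_cons]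
    have hjlen : j.toNat < pref.length := by omega
    have hx : PySem.List.pyGetD pref j 0 = pref[j.toNat] :=
      PySem.List.pyGetD_eq_getElem pref 0 (by omega) (by omega)
    have hq : trieQueryLoop s 0 (PySem.List.pyGetD pref j 0) mid 0 31
        = ((ysOf pref j.toNat).countP (fun z => decide (z ^^^ msk (pref[j.toNat]) ≤ msk mid)) : Int) := by
      rw [hx]; exact query_lemma φ s _ _ mid hInv
    have hB : bOuter pref 2147483647 (PySem.Int.band mid 2147483647) total j
        = total + ((ysOf pref j.toNat).countP (fun z => decide (z ^^^ msk (pref[j.toNat]) ≤ msk mid)) : Int) := by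
      simp only [bOuter]
      rw [hx, band_mask, band_mask]
      conv_lhs => rw [show PySem.List.pyRange 0 j = PySem.List.pyRange 0 ((j.toNat : Nat) : Int) from by
        rw [Int.toNat_of_nonneg (by omega : (0:Int) ≤ j)]]
      exact inner_lemma pref (msk mid) (msk (pref[j.toNat])) j.toNat (by omega) total
    have hA1 : aBody mid pref (total, s) j
        = (total + trieQueryLoop s 0 (PySem.List.pyGetD pref j 0) mid 0 31,
           trieInsert s (PySem.List.pyGetD pref j 0)) := rfl
    rw [hA1, hq, hB]
    obtain ⟨φ', hInv'⟩ := insert_lemma φ s _ (PySem.List.pyGetD pref j 0) hInv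
    have hys : ysOf pref j.toNat ++ [msk (PySem.List.pyGetD pref j 0)] = ysOf pref (j+1).toNat := by
      rw [hx, show (j+1).toNat = j.toNat + 1 from by omega, ysOf_succ pref j.toNat hjlen]
    rw [hys] at hInv'
    exact ih (j+1) (by omega) (by omega) _ _ φ' hInv'

-- ===== VERDICT (by name: the statement is the Claim_ definition above) =====
theorem count_pairs_le_spec : Claim_equal_count_pairs_le := by
  unfold Claim_equal_count_pairs_le
  intro mid pref n _ hpre
  obtain ⟨hne, hlen⟩ := hpre
  unfold Spec_count_pairs_le count_pairs_le count_pairs_le_alt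
  by_cases hn : n + 1 ≤ 1
  · rw [PySem.List.pyRange_one_eq_nil (by omega)]
    rfl
  · have hlen0 : 0 < pref.length := List.length_pos_of_ne_nil hne
    obtain ⟨φ1, hInv1⟩ := insert_lemma _ _ [] (PySem.List.pyGetD pref 0 0) base_invP
    have hys1 : ([] : List Nat) ++ [msk (PySem.List.pyGetD pref 0 0)] = ysOf pref (1:Int).toNat := by
      rw [PySem.List.pyGetD_eq_getElem pref 0 (le_refl 0) (by exact_mod_cast hlen0)]
      show [msk pref[(0:Int).toNat]] = ysOf pref 1
      rw [show (1:Nat) = 0 + 1 from rfl, ysOf_succ pref 0 hlen0]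
      rfl
    rw [hys1] at hInv1
    exact fold_sync mid pref n hlen n.toNat 1 (by omega) (le_refl 1) 0 _ φ1 hInv1
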